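-- pv_equiv track=rewrite | github.com/olinaliva/parallel-algorithms | src/paper_plots/num_overhead_vs_span.py | even_powers_list
-- ===== SOURCE A (Python) =====
-- def even_powers_list(max_num):
--     res = []
--     for i in range(max_num):
--         if i == 0:
--             res.append("$1$")
--         elif i%2 == 0:
--             res.append("$10^{"+str(i)+"}$")
--         else:
--             res.append("")
--     return res
-- ===== SOURCE B (Python) =====
-- def even_powers_list(max_num):
--     # Allocate-then-fill: preallocate empty labels, then set index 0 and
--     # the positive even indices with a strided loop.
--     res = [""] * max_num
--     if res:
--         res[0] = "$1$"
--     for i in range(2, max_num, 2):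
--         res[i] = "$10^{" + str(i) + "}$"
--     return res
-- ===== Notes on version B (the rewrite author's own statement) =====
-- stated objective: alternative
-- what changed: Replaces the visit-every-index three-way-branch append loop by preallocating the whole list of empty strings and then writing only the first slot and the positive even positions with a stride-2 loop.
import Mathlib
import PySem

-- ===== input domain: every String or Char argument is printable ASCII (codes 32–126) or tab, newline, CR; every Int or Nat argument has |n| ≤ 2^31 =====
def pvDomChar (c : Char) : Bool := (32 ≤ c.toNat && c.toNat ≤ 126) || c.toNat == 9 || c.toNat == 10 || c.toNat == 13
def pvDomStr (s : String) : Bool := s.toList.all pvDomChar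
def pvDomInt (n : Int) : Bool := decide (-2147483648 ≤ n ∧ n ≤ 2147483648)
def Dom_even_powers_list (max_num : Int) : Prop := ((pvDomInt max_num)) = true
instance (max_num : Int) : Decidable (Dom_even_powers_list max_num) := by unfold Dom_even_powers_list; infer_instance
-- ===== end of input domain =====

-- B preallocates the list of empty labels and fills index 0 and the positive even
-- indices with a stride-2 loop, instead of A's append loop branching at every index.


-- ===== PORT A =====
def even_powers_list (max_num : Int) : List String :=
  (PySem.List.pyRange 0 max_num 1).foldl
    (fun res i =>
      if i == 0 then res ++ ["$1$"]
      else if PySem.Int.mod i 2 == 0 then res ++ ["$10^{" ++ PySem.Int.toStr i ++ "}$"]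
      else res ++ [""]) []

-- ===== PORT B =====
def even_powers_list_alt (max_num : Int) : List String :=
  let res := List.replicate max_num.toNat ""
  let res := if res.isEmpty then res else res.set 0 "$1$"
  (PySem.List.pyRange 2 max_num 2).foldl
    (fun r i => r.set i.toNat ("$10^{" ++ PySem.Int.toStr i ++ "}$")) res

-- ===== PRECONDITION & SPEC =====
def Spec_even_powers_list (max_num : Int) (out : List String) : Prop := out = even_powers_list_alt max_num
instance (max_num : Int) (out : List String) : Decidable (Spec_even_powers_list max_num out) := by unfold Spec_even_powers_list; infer_instance

-- ===== CLAIM (what is proved, stated in full; the proofs are below) =====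
def Claim_equal_even_powers_list : Prop := ∀ (max_num : Int), Dom_even_powers_list max_num → Spec_even_powers_list max_num (even_powers_list max_num)

-- ===== LEMMAS AND PROOFS =====

-- A's per-index label.
def pvLabel (i : Int) : String :=
  if i == 0 then "$1$"
  else if PySem.Int.mod i 2 == 0 then "$10^{" ++ PySem.Int.toStr i ++ "}$"
  else ""

lemma evenA_eq_map (m : Int) :
    even_powers_list m = (PySem.List.pyRange 0 m 1).map pvLabel := by
  unfold even_powers_list
  have hfn : (fun (res : List String) (i : Int) =>
      if i == 0 then res ++ ["$1$"]
      else if PySem.Int.mod i 2 == 0 then res ++ ["$10^{" ++ PySem.Int.toStr i ++ "}$"]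
      else res ++ [""]) = (fun res i => res ++ [pvLabel i]) := by
    funext res i
    unfold pvLabel
    split_ifs <;> rfl
  rw [hfn, PySem.List.foldl_append_singleton_eq_map, List.nil_append]

-- Index view of a foldl of index-assignments (indices nonnegative).
lemma foldl_set_getElem? (g : Int → String) :
    ∀ (l : List Int) (r : List String) (j : Nat),
      (∀ i ∈ l, 0 ≤ i) →
      (l.foldl (fun r i => r.set i.toNat (g i)) r)[j]? =
        if ((j : Int) ∈ l ∧ j < r.length) then some (g j) else r[j]? := by
  intro l
  induction l with
  | nil => intro r j _; simp
  | cons i t ih =>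
    intro r j hpos
    have hi : 0 ≤ i := hpos i (by simp)
    have ht : ∀ x ∈ t, 0 ≤ x := fun x hx => hpos x (by simp [hx])
    rw [List.foldl_cons, ih _ j ht]
    by_cases hmem : (j : Int) ∈ t ∧ j < r.length
    · simp [hmem.1, hmem.2, List.length_set]
    · rw [if_neg (by simpa [List.length_set] using hmem)]
      rw [List.getElem?_set]
      by_cases hij : i.toNat = j
      · have hji : (j : Int) = i := by omega
        have hgg : g i = g j := by rw [hji]
        by_cases hjr : j < r.length
        · simp [hij, hjr, hgg, List.mem_cons, hji]
        · have hnone : r[j]? = none := by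
            rw [List.getElem?_eq_none_iff]; omega
          simp [hij, hjr]
      · have hji : ¬ ((j : Int) = i) := by omega
        simp [hij, hji, hmem]

lemma mem_pyRange2_nonneg (m : Int) : ∀ i ∈ PySem.List.pyRange 2 m 2, 0 ≤ i := by
  intro i hi
  have := (PySem.List.mem_pyRange_iff_of_pos (by norm_num) i).mp hi
  omega

theorem even_powers_list_spec : Claim_equal_even_powers_list := by
  unfold Claim_equal_even_powers_list
  intro m _
  unfold Spec_even_powers_list even_powers_list_alt
  rw [evenA_eq_map m]
  set g : Int → String := fun i => "$10^{" ++ PySem.Int.toStr i ++ "}$" with hg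
  set r0 : List String := List.replicate m.toNat "" with hr0
  set r1 : List String := if r0.isEmpty then r0 else r0.set 0 "$1$" with hr1
  have hlen0 : r0.length = m.toNat := by simp [hr0]
  have hlen1 : r1.length = m.toNat := by
    rw [hr1]; split <;> simp [hlen0]
  apply List.ext_getElem?
  intro j
  rw [foldl_set_getElem? g _ r1 j (mem_pyRange2_nonneg m)]
  rw [hlen1]
  by_cases hj : j < m.toNat
  · -- in-range index
    have hjm : (j : Int) < m := by omega
    have hmpos : 0 < m := by omega
    have hA : ((PySem.List.pyRange 0 m 1).map pvLabel)[j]? = some (pvLabel j) := by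
      rw [PySem.List.pyRange_one]
      simp only [List.map_map, List.getElem?_map]
      simp [hj]
    rw [hA]
    have hr0ne : ¬ r0.isEmpty := by
      simp [hr0]; omega
    have hr1e : r1 = r0.set 0 "$1$" := by rw [hr1, if_neg (by simpa using hr0ne)]
    have hmem : ∀ x : Nat, ((x : Int) ∈ PySem.List.pyRange 2 m 2 ↔ (2 ≤ x ∧ (2:Int) ∣ (x:Int) ∧ (x:Int) < m)) := by
      intro x
      rw [PySem.List.mem_pyRange_iff_of_pos (by norm_num)]
      constructor
      · rintro ⟨h1, h2, h3⟩
        exact ⟨by omega, by omega, h2⟩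
      · rintro ⟨h1, h2, h3⟩
        exact ⟨by omega, h3, by omega⟩
    by_cases hj0 : j = 0
    · subst hj0
      rw [if_neg (fun h => by have := (hmem 0).mp h.1; omega)]
      rw [hr1e, List.getElem?_set]
      simp [pvLabel, hlen0, hj]
    · -- j ≥ 1
      have hr1j : r1[j]? = some "" := by
        rw [hr1e, List.getElem?_set, if_neg (by omega), hr0]
        simp [hj]
      by_cases heven : (2:Int) ∣ (j:Int)
      · have hj2 : 2 ≤ j := by
          rcases heven with ⟨k, hk⟩; omega
        have hm2 : PySem.Int.mod (j : Int) 2 = 0 := by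
          rw [PySem.Int.mod_eq_emod_of_pos (by norm_num : (0:Int) < 2)]
          omega
        rw [if_pos ⟨(hmem j).mpr ⟨hj2, heven, hjm⟩, hj⟩]
        simp only [pvLabel, hg]
        simp [hj0, Int.natCast_eq_zero, heven]
      · have hodd : PySem.Int.mod (j : Int) 2 = 1 := by
          rw [PySem.Int.mod_eq_emod_of_pos (by norm_num : (0:Int) < 2)]
          omega
        rw [if_neg (fun h => heven ((hmem j).mp h.1).2.1)]
        rw [hr1j]
        simp only [pvLabel]
        simp [hj0, Int.natCast_eq_zero]
        omega
  · -- out of range: both none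
    rw [if_neg (fun h => hj h.2)]
    have hA : ((PySem.List.pyRange 0 m 1).map pvLabel)[j]? = none := by
      rw [List.getElem?_eq_none_iff]
      simp [PySem.List.length_pyRange_one]; omega
    have hB : r1[j]? = none := by
      rw [List.getElem?_eq_none_iff]; omega
    rw [hA, hB]
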